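-- pv_equiv track=rewrite | github.com/ChizhovYuI/lurii-pfm | src/pfm/ai/report_markdown_formatter.py | _render_blocks
-- ===== SOURCE A (Python) =====
-- def _render_blocks(blocks: list[tuple[str, list[str]]]) -> str:
--     merged_blocks: list[tuple[str, list[str]]] = []
--     for block_type, items in blocks:
--         if merged_blocks and block_type in {"unordered", "ordered"} and merged_blocks[-1][0] == block_type:
--             merged_type, merged_items = merged_blocks[-1]
--             merged_blocks[-1] = (merged_type, [*merged_items, *items])
--             continue
--         merged_blocks.append((block_type, items))
--
--     rendered_blocks: list[str] = []
--     for block_type, items in merged_blocks: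
--         if block_type == "paragraph":
--             rendered_blocks.append(items[0])
--             continue
--         if block_type == "unordered":
--             rendered_blocks.append("\n".join(f"- {item}" for item in items))
--             continue
--         rendered_blocks.append("\n".join(f"{index}. {item}" for index, item in enumerate(items, start=1)))
--     return "\n\n".join(rendered_blocks)
-- ===== SOURCE B (Python) =====
-- def _render_blocks(blocks: list[tuple[str, list[str]]]) -> str:
--     # Single pass: render incrementally, keeping the item lines of the
--     # currently open list group and flushing it when the type changes.
--     groups: list[str] = []
--     open_type = None
--     lines: list[str] = []
--     for block_type, items in blocks:
--         if block_type in ("unordered", "ordered"):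
--             if block_type != open_type:
--                 if open_type is not None:
--                     groups.append("\n".join(lines))
--                 open_type, lines = block_type, []
--             if block_type == "unordered":
--                 lines.extend("- " + item for item in items)
--             else:
--                 base = len(lines)
--                 lines.extend(f"{base + k}. {item}" for k, item in enumerate(items, start=1))
--         else:
--             if open_type is not None:
--                 groups.append("\n".join(lines))
--                 open_type, lines = None, []
--             if block_type == "paragraph":
--                 groups.append(items[0])
--             else:
--                 groups.append("\n".join(f"{k}. {item}" for k, item in enumerate(items, start=1)))
--     if open_type is not None:
--         groups.append("\n".join(lines))
--     return "\n\n".join(groups)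
-- ===== Notes on version B (the rewrite author's own statement) =====
-- stated objective: alternative
-- what changed: Replaces A's two passes (merge consecutive same-type list blocks into a new block list, then render every merged block) with one pass that renders incrementally, keeping the item lines of the currently open list group and flushing the group when the block type changes; ordered numbering continues from the count of accumulated lines.
import Mathlib
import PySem

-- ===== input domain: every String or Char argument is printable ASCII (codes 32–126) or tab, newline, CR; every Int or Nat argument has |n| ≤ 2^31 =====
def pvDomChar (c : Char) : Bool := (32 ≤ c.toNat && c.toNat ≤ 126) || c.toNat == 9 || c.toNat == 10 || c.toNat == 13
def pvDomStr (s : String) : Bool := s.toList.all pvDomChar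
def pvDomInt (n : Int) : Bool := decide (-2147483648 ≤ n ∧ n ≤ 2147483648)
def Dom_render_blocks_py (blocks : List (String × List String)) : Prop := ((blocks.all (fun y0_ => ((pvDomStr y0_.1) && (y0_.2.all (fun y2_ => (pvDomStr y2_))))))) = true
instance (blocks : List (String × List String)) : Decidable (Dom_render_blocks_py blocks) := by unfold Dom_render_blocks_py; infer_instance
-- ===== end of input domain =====

-- B fuses A's merge pass and render pass into one incremental-rendering pass (alternative decomposition, same cost).

-- ===== PORT A =====
-- f"{index}. {item}" over enumerate(items, start=base+1)
def pvNumbered (base : Int) : List String → List String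
  | [] => []
  | x :: xs => (PySem.Int.toStr (base + 1) ++ ". " ++ x) :: pvNumbered (base + 1) xs

-- one iteration of A's merge loop
def pvMergeStep (acc : List (String × List String)) (b : String × List String) : List (String × List String) :=
  match acc.getLast? with
  | some (lt, li) =>
    if (b.1 == "unordered" || b.1 == "ordered") && lt == b.1 then
      acc.dropLast ++ [(lt, li ++ b.2)]
    else acc ++ [b]
  | none => acc ++ [b]

-- one iteration of A's render loop (items[0] is total under Pre_; none would be Python's IndexError)
def pvRenderBlock (b : String × List String) : String :=
  if b.1 == "paragraph" then (PySem.List.pyGet? b.2 0).getD ""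
  else if b.1 == "unordered" then PySem.Str.join "\n" (b.2.map (fun item => "- " ++ item))
  else PySem.Str.join "\n" (pvNumbered 0 b.2)

def render_blocks_py (blocks : List (String × List String)) : String :=
  PySem.Str.join "\n\n" ((blocks.foldl pvMergeStep []).map pvRenderBlock)

-- ===== PORT B =====
-- state: (closed rendered groups, open list type, item lines of the open group)
def pvBStep (st : List String × Option String × List String) (b : String × List String) :
    List String × Option String × List String :=
  if b.1 == "unordered" || b.1 == "ordered" then
    let gl : List String × List String :=
      if some b.1 == st.2.1 then (st.1, st.2.2)
      else ((if st.2.1.isSome then st.1 ++ [PySem.Str.join "\n" st.2.2] else st.1), [])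
    if b.1 == "unordered" then
      (gl.1, some b.1, gl.2 ++ b.2.map (fun item => "- " ++ item))
    else
      (gl.1, some b.1, gl.2 ++ pvNumbered (gl.2.length : Int) b.2)
  else
    let groups := if st.2.1.isSome then st.1 ++ [PySem.Str.join "\n" st.2.2] else st.1
    if b.1 == "paragraph" then (groups ++ [(PySem.List.pyGet? b.2 0).getD ""], none, [])
    else (groups ++ [PySem.Str.join "\n" (pvNumbered 0 b.2)], none, [])

def render_blocks_py_alt (blocks : List (String × List String)) : String :=
  PySem.Str.join "\n\n"
    (if (blocks.foldl pvBStep ([], none, [])).2.1.isSome then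
      (blocks.foldl pvBStep ([], none, [])).1 ++
        [PySem.Str.join "\n" (blocks.foldl pvBStep ([], none, [])).2.2]
    else (blocks.foldl pvBStep ([], none, [])).1)

-- ===== PRECONDITION & SPEC =====
-- Pre_ excludes inputs where a "paragraph" block has an empty items list: there A (and B) raise IndexError on items[0].
def Pre_render_blocks_py (blocks : List (String × List String)) : Prop :=
  ∀ b ∈ blocks, b.1 = "paragraph" → b.2 ≠ []
instance (blocks : List (String × List String)) : Decidable (Pre_render_blocks_py blocks) := by
  unfold Pre_render_blocks_py; infer_instance

def pvWitness_render_blocks_py : (List (String × List String)) :=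
  [("paragraph", ["hi"]), ("ordered", ["a"]), ("ordered", ["b"]), ("unordered", ["c"])]

def Spec_render_blocks_py (blocks : List (String × List String)) (out : String) : Prop := out = render_blocks_py_alt blocks
instance (blocks : List (String × List String)) (out : String) : Decidable (Spec_render_blocks_py blocks out) := by unfold Spec_render_blocks_py; infer_instance

-- ===== CLAIM (what is proved, stated in full; the proofs are below) =====
def Claim_equal_render_blocks_py : Prop := ∀ (blocks : List (String × List String)), Dom_render_blocks_py blocks → Pre_render_blocks_py blocks → Spec_render_blocks_py blocks (render_blocks_py blocks)

-- ===== LEMMAS AND PROOFS =====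

theorem pvNumbered_length (base : Int) (l : List String) : (pvNumbered base l).length = l.length := by
  induction l generalizing base with
  | nil => rfl
  | cons x xs ih => simp [pvNumbered, ih]

theorem pvNumbered_append (base : Int) (l₁ l₂ : List String) :
    pvNumbered base (l₁ ++ l₂) = pvNumbered base l₁ ++ pvNumbered (base + l₁.length) l₂ := by
  induction l₁ generalizing base with
  | nil => simp [pvNumbered]
  | cons x xs ih =>
    simp only [List.cons_append, pvNumbered, ih, List.length_cons]
    have h : base + 1 + (xs.length : Int) = base + ((xs.length : Int) + 1) := by ring
    push_cast
    rw [h]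

-- rendered item lines of a list-type block
def pvItemLines (t : String) (li : List String) : List String :=
  if t == "unordered" then li.map (fun item => "- " ++ item) else pvNumbered 0 li

-- B's state as a function of A's merged-block accumulator
def pvStateOf (merged : List (String × List String)) : List String × Option String × List String :=
  match merged.getLast? with
  | none => ([], none, [])
  | some (lt, li) =>
    if lt == "unordered" || lt == "ordered" then
      (merged.dropLast.map pvRenderBlock, some lt, pvItemLines lt li)
    else (merged.map pvRenderBlock, none, [])

theorem map_eq_dropLast_concat {α β : Type} (f : α → β) (l : List α) (x : α)
    (h : l.getLast? = some x) : l.map f = l.dropLast.map f ++ [f x] := by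
  induction l with
  | nil => simp at h
  | cons a l ih =>
    cases l with
    | nil => simp_all
    | cons b l' =>
      simp only [List.getLast?_cons_cons] at h
      rw [List.map_cons, ih h]
      rfl

theorem render_list_block (t : String) (li : List String)
    (ht : (t == "unordered" || t == "ordered") = true) :
    pvRenderBlock (t, li) = PySem.Str.join "\n" (pvItemLines t li) := by
  have : t ≠ "paragraph" := by
    rcases Bool.or_eq_true_iff.mp ht with h | h <;> simp [beq_iff_eq] at h <;> simp [h]
  by_cases hu : t = "unordered" <;> simp [pvRenderBlock, pvItemLines, this, hu]

theorem map_flush (f : String × List String → String) (l : List (String × List String))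
    (x : String × List String) (h : l.getLast? = some x) :
    (l.map f).dropLast ++ [f x] = l.map f := by
  have := map_eq_dropLast_concat f l x h
  rw [this, List.dropLast_concat]

theorem pvFlush_eq (merged : List (String × List String)) :
    (if (pvStateOf merged).2.1.isSome then
      (pvStateOf merged).1 ++ [PySem.Str.join "\n" (pvStateOf merged).2.2]
      else (pvStateOf merged).1) = merged.map pvRenderBlock := by
  cases hlast : merged.getLast? with
  | none =>
    have hm : merged = [] := List.getLast?_eq_none_iff.mp hlast
    subst hm; simp [pvStateOf]
  | some p =>
    obtain ⟨lt, li⟩ := p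
    by_cases hltl : (lt == "unordered" || lt == "ordered") = true
    · have hflush0 : (merged.map pvRenderBlock).dropLast ++
          [PySem.Str.join "\n" (pvItemLines lt li)] = merged.map pvRenderBlock := by
        rw [← render_list_block lt li hltl]
        exact map_flush pvRenderBlock merged (lt, li) hlast
      simp [pvStateOf, hlast, hltl, hflush0]
    · simp [pvStateOf, hlast, hltl]

theorem pvStep_comm (merged : List (String × List String)) (b : String × List String) :
    pvBStep (pvStateOf merged) b = pvStateOf (pvMergeStep merged b) := by
  obtain ⟨t, items⟩ := b
  by_cases hlist : (t == "unordered" || t == "ordered") = true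
  · -- t is a list type
    have hto : t = "unordered" ∨ t = "ordered" := by
      rcases Bool.or_eq_true_iff.mp hlist with h | h
      · exact Or.inl (by simpa [beq_iff_eq] using h)
      · exact Or.inr (by simpa [beq_iff_eq] using h)
    cases hlast : merged.getLast? with
    | none =>
      have hm : merged = [] := List.getLast?_eq_none_iff.mp hlast
      subst hm
      rcases hto with hu | hu <;> subst hu <;>
        simp [pvBStep, pvMergeStep, pvStateOf, pvItemLines]
    | some p =>
      obtain ⟨lt, li⟩ := p
      by_cases hsame : lt = t
      · -- merge case
        subst hsame
        have hrhs : pvMergeStep merged (lt, items) = merged.dropLast ++ [(lt, li ++ items)] := by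
          simp [pvMergeStep, hlast, hlist]
        rw [hrhs]
        have hst : pvStateOf merged =
            (merged.dropLast.map pvRenderBlock, some lt, pvItemLines lt li) := by
          simp [pvStateOf, hlast, hlist]
        have hst2 : pvStateOf (merged.dropLast ++ [(lt, li ++ items)]) =
            (merged.dropLast.map pvRenderBlock, some lt, pvItemLines lt (li ++ items)) := by
          simp [pvStateOf, hlist]
        rw [hst, hst2]
        rcases hto with hu | hu <;> subst hu
        · simp [pvBStep, pvItemLines]
        · simp [pvBStep, pvItemLines, pvNumbered_append, pvNumbered_length]
      · -- type changes: flush (or not) and open a new group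
        have hrhs : pvMergeStep merged (t, items) = merged ++ [(t, items)] := by
          simp [pvMergeStep, hlast, beq_iff_eq, hsame]
        rw [hrhs]
        have hst2 : pvStateOf (merged ++ [(t, items)]) =
            (merged.map pvRenderBlock, some t, pvItemLines t items) := by
          simp [pvStateOf, hlist]
        rw [hst2]
        by_cases hltl : (lt == "unordered" || lt == "ordered") = true
        · have hst : pvStateOf merged =
              (merged.dropLast.map pvRenderBlock, some lt, pvItemLines lt li) := by
            simp [pvStateOf, hlast, hltl]
          rw [hst]
          have hflush : (merged.map pvRenderBlock).dropLast ++
              [PySem.Str.join "\n" (pvItemLines lt li)] = merged.map pvRenderBlock := by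
            rw [← render_list_block lt li hltl]
            exact map_flush pvRenderBlock merged (lt, li) hlast
          rcases hto with hu | hu <;> subst hu <;>
            simp_all [pvBStep, pvItemLines]
        · have hst : pvStateOf merged = (merged.map pvRenderBlock, none, []) := by
            simp [pvStateOf, hlast, hltl]
          rw [hst]
          rcases hto with hu | hu <;> subst hu <;>
            simp [pvBStep, pvItemLines]
  · -- t is not a list type: close any open group and render the block alone
    have hrhs : pvMergeStep merged (t, items) = merged ++ [(t, items)] := by
      cases hlast : merged.getLast? with
      | none => simp [pvMergeStep, hlast]
      | some p => obtain ⟨lt, li⟩ := p; simp [pvMergeStep, hlast, hlist]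
    rw [hrhs]
    have hst2 : pvStateOf (merged ++ [(t, items)]) =
        ((merged ++ [(t, items)]).map pvRenderBlock, none, []) := by
      simp [pvStateOf, hlist]
    rw [hst2]
    have hflush : (if (pvStateOf merged).2.1.isSome then
        (pvStateOf merged).1 ++ [PySem.Str.join "\n" (pvStateOf merged).2.2]
        else (pvStateOf merged).1) = merged.map pvRenderBlock := pvFlush_eq merged
    by_cases hp : t = "paragraph"
    · simp only [pvBStep, hp]
      simp [hflush, pvRenderBlock]
    · have hu : (t == "unordered") = false := by
        by_contra h
        exact hlist (Bool.or_eq_true_iff.mpr (Or.inl (by simpa using h)))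
      simp only [pvBStep, hlist]
      simp [hp, hflush, pvRenderBlock, hu, beq_iff_eq]

theorem pvFold_comm (blocks merged : List (String × List String)) :
    blocks.foldl pvBStep (pvStateOf merged) = pvStateOf (blocks.foldl pvMergeStep merged) := by
  induction blocks generalizing merged with
  | nil => rfl
  | cons b bs ih => simp [List.foldl_cons, pvStep_comm, ih]

-- ===== VERDICT (by name: the statement is the Claim_ definition above) =====
theorem render_blocks_py_spec : Claim_equal_render_blocks_py := by
  intro blocks _ _
  unfold Spec_render_blocks_py render_blocks_py render_blocks_py_alt
  have h0 : (([], none, []) : List String × Option String × List String) = pvStateOf [] := rfl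
  rw [h0, pvFold_comm blocks [], pvFlush_eq]
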